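-- pv_equiv track=rewrite | github.com/NC0DER/CORDISKG | CordisKG/utils.py | get_diff_of_keys
-- ===== SOURCE A (Python) =====
-- def get_diff_of_keys(source, target):
--     """
--     Function which returns a list of keyphrases,
--     that are included in source but not in target.
--     This done through partial match of their keyphrases.
--     Each keyphrase is lowercase and split in a set of terms
--     to enable this partial match.
--     """
--     return [
--         key_src for key_src in source
--         if not any(
--             set(key_src.lower().split())
--             & set(key_tar.lower().split())
--             for key_tar in target)
--     ]
-- ===== SOURCE B (Python) =====
-- def get_diff_of_keys(source, target):
--     """Same result as A: keep source keyphrases sharing no term with any target.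
--
--     Different decomposition: collect ALL target terms into one set in a single
--     pass over target, then filter source against that set -- instead of
--     intersecting each source term-set with each target term-set.
--     """
--     target_terms = set()
--     for key_tar in target:
--         target_terms.update(key_tar.lower().split())
--     return [
--         key_src for key_src in source
--         if all(term not in target_terms for term in key_src.lower().split())
--     ]
-- ===== Notes on version B (the rewrite author's own statement) =====
-- stated objective: faster
-- what changed: B builds one set of all lowercased target terms in a single pass and filters source by membership in it, instead of A's per-source intersection with every target's term-set.
import Mathlib
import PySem

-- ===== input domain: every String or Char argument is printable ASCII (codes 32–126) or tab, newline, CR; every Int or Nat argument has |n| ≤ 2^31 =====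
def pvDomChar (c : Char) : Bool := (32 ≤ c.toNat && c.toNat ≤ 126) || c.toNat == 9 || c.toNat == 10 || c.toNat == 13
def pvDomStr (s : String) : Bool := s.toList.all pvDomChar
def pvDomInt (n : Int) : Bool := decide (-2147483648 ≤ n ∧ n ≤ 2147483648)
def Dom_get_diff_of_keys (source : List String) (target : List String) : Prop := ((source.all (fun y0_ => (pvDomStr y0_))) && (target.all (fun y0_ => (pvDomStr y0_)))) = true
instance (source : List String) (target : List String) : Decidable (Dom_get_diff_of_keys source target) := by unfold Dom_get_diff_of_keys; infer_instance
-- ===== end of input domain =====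

-- B collects all lowercased target terms into ONE set in a single pass and filters
-- source by membership in it, instead of A's per-source intersection with every target.

-- ===== PORT A =====
def get_diff_of_keys (source : List String) (target : List String) : List String :=
  source.filter (fun key_src =>
    !(target.any (fun key_tar =>
      !(PySem.Set.inter (PySem.Set.ofList (PySem.Str.split₀ (PySem.Str.lower key_src)))
                        (PySem.Set.ofList (PySem.Str.split₀ (PySem.Str.lower key_tar)))).isEmpty)))

-- ===== PORT B =====
def get_diff_of_keys_alt (source : List String) (target : List String) : List String :=
  let target_terms := target.foldl
    (fun s key_tar => PySem.Set.update s (PySem.Str.split₀ (PySem.Str.lower key_tar)))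
    PySem.Set.empty
  source.filter (fun key_src =>
    (PySem.Str.split₀ (PySem.Str.lower key_src)).all
      (fun term => !(PySem.Set.contains target_terms term)))

-- ===== PRECONDITION & SPEC =====
def Spec_get_diff_of_keys (source : List String) (target : List String) (out : List String) : Prop := out = get_diff_of_keys_alt source target
instance (source : List String) (target : List String) (out : List String) : Decidable (Spec_get_diff_of_keys source target out) := by unfold Spec_get_diff_of_keys; infer_instance

-- ===== CLAIM (what is proved, stated in full; the proofs are below) =====
def Claim_equal_get_diff_of_keys : Prop := ∀ (source : List String) (target : List String), Dom_get_diff_of_keys source target → Spec_get_diff_of_keys source target (get_diff_of_keys source target)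

-- ===== LEMMAS AND PROOFS =====

-- membership in the accumulated target-term set
theorem mem_foldl_update {α : Type} [BEq α] [LawfulBEq α] (f : String → List α)
    (l : List String) (s : PySem.Set α) (x : α) :
    (x ∈ l.foldl (fun s t => PySem.Set.update s (f t)) s) ↔
      x ∈ s ∨ ∃ t ∈ l, x ∈ f t := by
  induction l generalizing s with
  | nil => simp
  | cons h tl ih =>
    simp [List.foldl_cons, ih, PySem.Set.mem_update]
    tauto

theorem inter_empty_iff {α : Type} [BEq α] [LawfulBEq α] (xs ys : List α) :
    (PySem.Set.inter (PySem.Set.ofList xs) (PySem.Set.ofList ys)).isEmpty = true ↔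
      ∀ x ∈ xs, x ∉ ys := by
  rw [List.isEmpty_iff, List.eq_nil_iff_forall_not_mem]
  constructor
  · intro h x hx hy
    exact h x ((PySem.Set.mem_inter _ _ _).mpr
      ⟨(PySem.Set.mem_ofList _ _).mpr hx, (PySem.Set.mem_ofList _ _).mpr hy⟩)
  · intro h x hx
    obtain ⟨h1, h2⟩ := (PySem.Set.mem_inter _ _ _).mp hx
    exact h x ((PySem.Set.mem_ofList _ _).mp h1) ((PySem.Set.mem_ofList _ _).mp h2)

theorem not_bang_true {b : Bool} (h : ¬ ((!b) = true)) : b = true := by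
  cases b <;> simp at h ⊢

theorem pred_eq (target : List String) (key_src : String) :
    (!(target.any (fun key_tar =>
      !(PySem.Set.inter (PySem.Set.ofList (PySem.Str.split₀ (PySem.Str.lower key_src)))
                        (PySem.Set.ofList (PySem.Str.split₀ (PySem.Str.lower key_tar)))).isEmpty)))
    =
    ((PySem.Str.split₀ (PySem.Str.lower key_src)).all
      (fun term => !(PySem.Set.contains
        (target.foldl (fun s key_tar => PySem.Set.update s (PySem.Str.split₀ (PySem.Str.lower key_tar))) PySem.Set.empty)
        term))) := by
  rw [Bool.eq_iff_iff, Bool.not_eq_true', List.any_eq_false, List.all_eq_true]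
  constructor
  · intro h term hterm
    rw [Bool.not_eq_true', PySem.Set.contains_eq_listContains, List.contains_eq_mem,
        decide_eq_false_iff_not, mem_foldl_update]
    rintro (hc | ⟨t, ht, hx⟩)
    · exact List.not_mem_nil hc
    · exact (inter_empty_iff _ _).mp (not_bang_true (h t ht)) term hterm hx
  · intro h key_tar htar hbang
    have h2 : ¬ ((PySem.Set.inter (PySem.Set.ofList (PySem.Str.split₀ (PySem.Str.lower key_src)))
        (PySem.Set.ofList (PySem.Str.split₀ (PySem.Str.lower key_tar)))).isEmpty = true) := by
      intro he
      rw [he] at hbang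
      simp at hbang
    apply h2
    rw [inter_empty_iff]
    intro x hx1 hx2
    have h3 := h x hx1
    rw [Bool.not_eq_true', PySem.Set.contains_eq_listContains, List.contains_eq_mem,
        decide_eq_false_iff_not, mem_foldl_update] at h3
    exact h3 (Or.inr ⟨key_tar, htar, hx2⟩)

-- ===== VERDICT (by name: the statement is the Claim_ definition above) =====
theorem get_diff_of_keys_spec : Claim_equal_get_diff_of_keys := by
  intro source target _
  unfold Spec_get_diff_of_keys get_diff_of_keys get_diff_of_keys_alt
  exact List.filter_congr (fun key_src _ => pred_eq target key_src)
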